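-- pv_equiv track=rewrite | github.com/jfcajas/chatbot | Chatbot/Chat/util/order_results.py | extractMatchIndex
-- ===== SOURCE A (Python) =====
-- def extractMatchIndex(match):
--     start_index = []
--     end_index = []
--     for i in range(len(match)):
--         if match.startswith("'# ", i):
--             start_index.append(i + 3)
--         elif match.startswith("'#", i):
--             start_index.append(i + 2)
--         if match.startswith("'>", i):
--             end_index.append(i)
--     return start_index, end_index
-- ===== SOURCE B (Python) =====
-- def _find_all(match, pat):
--     res = []
--     pos = match.find(pat)
--     while pos != -1:
--         res.append(pos)
--         pos = match.find(pat, pos + 1)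
--     return res
--
--
-- def extractMatchIndex(match):
--     start_index = [p + 3 if match.startswith("'# ", p) else p + 2
--                    for p in _find_all(match, "'#")]
--     end_index = _find_all(match, "'>")
--     return start_index, end_index
-- ===== Notes on version B (the rewrite author's own statement) =====
-- stated objective: faster
-- what changed: Replaces the per-index loop that tests startswith at every position with cursor-driven str.find loops that jump directly from one marker occurrence to the next.
import Mathlib
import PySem

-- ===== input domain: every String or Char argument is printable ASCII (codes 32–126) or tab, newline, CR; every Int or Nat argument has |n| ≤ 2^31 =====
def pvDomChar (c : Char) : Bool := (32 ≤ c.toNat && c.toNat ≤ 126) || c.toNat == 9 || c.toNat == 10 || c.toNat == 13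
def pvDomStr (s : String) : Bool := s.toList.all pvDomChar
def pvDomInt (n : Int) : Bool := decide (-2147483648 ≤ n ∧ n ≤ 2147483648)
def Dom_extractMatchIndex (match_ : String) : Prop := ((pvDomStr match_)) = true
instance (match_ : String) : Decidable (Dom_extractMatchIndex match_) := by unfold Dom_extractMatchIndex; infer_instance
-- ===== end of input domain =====

-- B replaces A's test-every-index scan by cursor-driven find-loops that jump between marker
-- occurrences (a constant-factor speedup in Python; same return value, proved below).


-- ===== PORT A =====
-- Python's s.startswith(pat, i) for 0 ≤ i: pat tested against s[i:] (exact on nonnegative i)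
def pvStartswithAt (cs pat : List Char) (i : Nat) : Bool := pat.isPrefixOf (cs.drop i)

def extractMatchIndex (match_ : String) : List Int × List Int :=
  (PySem.List.pyRange 0 (PySem.Str.len match_) 1).foldl
    (fun acc i =>
      let acc1 :=
        if pvStartswithAt match_.toList ['\'', '#', ' '] i.toNat then (acc.1 ++ [i + 3], acc.2)
        else if pvStartswithAt match_.toList ['\'', '#'] i.toNat then (acc.1 ++ [i + 2], acc.2)
        else acc
      if pvStartswithAt match_.toList ['\'', '>'] i.toNat then (acc1.1, acc1.2 ++ [i]) else acc1)
    ([], [])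

-- ===== PORT B =====
-- Source B's _find_all while-loop: repeated match.find(pat, pos); the fuel argument only bounds the
-- iteration count (cs.length + 1 always suffices) to make the recursion structural.
def pvFindAllGo (cs pat : List Char) : Nat → Int → List Int
  | 0, _ => []
  | fuel + 1, pos =>
    let p := PySem.Chars.findFrom cs pat pos none
    if p = -1 then []
    else p :: pvFindAllGo cs pat fuel (p + 1)

def pvFindAll (cs pat : List Char) : List Int := pvFindAllGo cs pat (cs.length + 1) 0

def extractMatchIndex_alt (match_ : String) : List Int × List Int :=
  let cs := match_.toList
  ((pvFindAll cs ['\'', '#']).map (fun p =>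
      if pvStartswithAt cs ['\'', '#', ' '] p.toNat then p + 3 else p + 2),
   pvFindAll cs ['\'', '>'])

-- ===== PRECONDITION & SPEC =====
def Spec_extractMatchIndex (match_ : String) (out : List Int × List Int) : Prop := out = extractMatchIndex_alt match_
instance (match_ : String) (out : List Int × List Int) : Decidable (Spec_extractMatchIndex match_ out) := by unfold Spec_extractMatchIndex; infer_instance

-- ===== CLAIM (what is proved, stated in full; the proofs are below) =====
def Claim_equal_extractMatchIndex : Prop := ∀ (match_ : String), Dom_extractMatchIndex match_ → Spec_extractMatchIndex match_ (extractMatchIndex match_)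

-- ===== LEMMAS AND PROOFS =====

theorem pvStartswithAt_iff (cs pat : List Char) (i : Nat) :
    pvStartswithAt cs pat i = true ↔ pat <+: cs.drop i := by
  unfold pvStartswithAt; exact List.isPrefixOf_iff_prefix

theorem pvStartswithAt_eq_false_iff (cs pat : List Char) (i : Nat) :
    pvStartswithAt cs pat i = false ↔ ¬ pat <+: cs.drop i := by
  rw [Bool.eq_false_iff, Ne, pvStartswithAt_iff]

-- the positions i ≥ k at which pat occurs in cs, in increasing order
def pvOccsFrom (cs pat : List Char) (k : Nat) : List Nat :=
  (List.range' k (cs.length - k)).filter (fun i => pvStartswithAt cs pat i)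

theorem pvOccsFrom_succ (cs pat : List Char) (k : Nat) (h : k < cs.length) :
    pvOccsFrom cs pat k =
      (if pvStartswithAt cs pat k then [k] else []) ++ pvOccsFrom cs pat (k + 1) := by
  have hk : cs.length - k = (cs.length - (k + 1)) + 1 := by omega
  simp only [pvOccsFrom, hk, List.range'_succ, List.filter_cons]
  split_ifs <;> simp_all

theorem pvOccsFrom_eq_nil (cs pat : List Char) (k : Nat)
    (h : ∀ i, k ≤ i → pvStartswithAt cs pat i = false) :
    pvOccsFrom cs pat k = [] := by
  apply List.filter_eq_nil_iff.mpr
  intro i hi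
  have : k ≤ i := (List.mem_range'_1.mp hi).1
  simp [h i this]

theorem pvOccsFrom_eq_cons (cs pat : List Char) (m : Nat)
    (hm2 : m < cs.length) (hP : pvStartswithAt cs pat m = true) :
    ∀ d k, m = k + d → (∀ i, k ≤ i → i < m → pvStartswithAt cs pat i = false) →
      pvOccsFrom cs pat k = m :: pvOccsFrom cs pat (m + 1) := by
  intro d
  induction d with
  | zero =>
    intro k hk _
    obtain rfl : k = m := by omega
    rw [pvOccsFrom_succ cs pat k hm2, hP]
    rfl
  | succ d ih =>
    intro k hk hmin
    rw [pvOccsFrom_succ cs pat k (by omega)]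
    simp only [hmin k le_rfl (by omega), Bool.false_eq_true, if_false, List.nil_append]
    exact ih (k + 1) (by omega) (fun i h1 h2 => hmin i (by omega) h2)

-- prefix at a later position is an infix of the earlier suffix
theorem pvPrefix_infix (cs pat : List Char) (k i : Nat) (hki : k ≤ i)
    (h : pat <+: cs.drop i) : pat <:+: cs.drop k := by
  have : cs.drop i = (cs.drop k).drop (i - k) := by
    rw [List.drop_drop]; congr 1; omega
  rw [this] at h
  exact h.isInfix.trans (List.drop_suffix _ _).isInfix

theorem pvFindAllGo_eq (cs pat : List Char) (hpat : pat ≠ []) :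
    ∀ fuel k, k ≤ cs.length → cs.length + 1 - k ≤ fuel →
      pvFindAllGo cs pat fuel (k : Int) = (pvOccsFrom cs pat k).map (fun m : Nat => (m : Int)) := by
  intro fuel
  induction fuel with
  | zero => intro k hk hf; omega
  | succ fuel ih =>
    intro k hk hf
    by_cases hr : PySem.Chars.findFrom cs pat (k : Int) none = -1
    · rw [pvFindAllGo]
      simp only [hr]
      rw [pvOccsFrom_eq_nil]
      · simp
      · intro i hi
        rw [pvStartswithAt_eq_false_iff]
        intro hpre
        exact (PySem.Chars.findFrom_natCast_eq_neg_one_iff cs pat k hk).mp hr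
          (pvPrefix_infix cs pat k i hi hpre)
    · obtain ⟨h1, h2, h3⟩ := PySem.Chars.findFrom_natCast_spec cs pat k hk hr
      set r := PySem.Chars.findFrom cs pat (k : Int) none with hrdef
      have hr0 : 0 ≤ r := le_trans (by exact_mod_cast Int.natCast_nonneg k) h1
      have hrn : r.toNat < cs.length := by
        have hne : cs.drop r.toNat ≠ [] := by
          intro hnil; rw [hnil] at h2; exact hpat (List.prefix_nil.mp h2)
        have := List.length_drop (l := cs) (i := r.toNat) ▸ List.length_pos_iff.mpr hne
        omega
      have hkr : k ≤ r.toNat := by omega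
      rw [pvFindAllGo]
      simp only [← hrdef, hr]
      have hcast : r = ((r.toNat : Nat) : Int) := by omega
      have hcast1 : r + 1 = (((r.toNat + 1 : Nat)) : Int) := by omega
      rw [hcast1, ih (r.toNat + 1) (by omega) (by omega)]
      rw [pvOccsFrom_eq_cons cs pat r.toNat hrn
            ((pvStartswithAt_iff cs pat r.toNat).mpr h2) (r.toNat - k) k (by omega)
            (fun i hi1 hi2 => (pvStartswithAt_eq_false_iff cs pat i).mpr (h3 i hi1 hi2))]
      simp [← hcast]

-- the one-pass pair fold of A, split into two filterMaps
theorem pvFoldA (cs : List Char) (l : List Nat) (accS accE : List Int) :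
    (l.map (fun k : Nat => (k : Int))).foldl
      (fun acc i =>
        let acc1 :=
          if pvStartswithAt cs ['\'', '#', ' '] i.toNat then (acc.1 ++ [i + 3], acc.2)
          else if pvStartswithAt cs ['\'', '#'] i.toNat then (acc.1 ++ [i + 2], acc.2)
          else acc
        if pvStartswithAt cs ['\'', '>'] i.toNat then (acc1.1, acc1.2 ++ [i]) else acc1)
      (accS, accE) =
    (accS ++ l.filterMap (fun m =>
        if pvStartswithAt cs ['\'', '#', ' '] m then some ((m : Int) + 3)
        else if pvStartswithAt cs ['\'', '#'] m then some ((m : Int) + 2) else none),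
     accE ++ l.filterMap (fun m =>
        if pvStartswithAt cs ['\'', '>'] m then some ((m : Int)) else none)) := by
  induction l generalizing accS accE with
  | nil => simp
  | cons m l ih =>
    simp only [List.map_cons, List.foldl_cons, List.filterMap_cons, Int.toNat_natCast]
    split_ifs <;> simp_all

theorem pvFilterMap_ite {α β : Type} (q : α → Bool) (h : α → β) (l : List α) :
    l.filterMap (fun m => if q m then some (h m) else none) = (l.filter q).map h := by
  induction l with
  | nil => rfl
  | cons a l ih => by_cases hq : q a <;> simp [hq, ih]

theorem pvS3_imp_S2 (cs : List Char) (m : Nat) (h : pvStartswithAt cs ['\'', '#', ' '] m = true) :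
    pvStartswithAt cs ['\'', '#'] m = true := by
  rw [pvStartswithAt_iff] at *
  exact List.IsPrefix.trans ⟨[' '], rfl⟩ h

theorem extractMatchIndex_spec : Claim_equal_extractMatchIndex := by
  intro match_ _
  unfold Spec_extractMatchIndex extractMatchIndex extractMatchIndex_alt pvFindAll
  rw [PySem.Str.len_eq, PySem.List.pyRange_one]
  simp only [Int.sub_zero, Int.toNat_natCast, List.range_eq_range', zero_add]
  rw [pvFoldA]
  have h1 := pvFindAllGo_eq match_.toList ['\'', '#'] (by simp)
      (match_.toList.length + 1) 0 (by omega) (by omega)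
  have h2 := pvFindAllGo_eq match_.toList ['\'', '>'] (by simp)
      (match_.toList.length + 1) 0 (by omega) (by omega)
  simp only [Nat.cast_zero] at h1 h2
  simp only [h1, h2, List.map_map, List.nil_append, Prod.mk.injEq]
  constructor
  · have hcomp : ((fun p : Int =>
        if pvStartswithAt match_.toList ['\'', '#', ' '] p.toNat then p + 3 else p + 2) ∘
          (fun m : Nat => (m : Int))) =
        (fun m : Nat => if pvStartswithAt match_.toList ['\'', '#', ' '] m then (m : Int) + 3
          else (m : Int) + 2) := by
      funext m; simp [Function.comp]
    rw [hcomp, pvOccsFrom]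
    simp only [Nat.sub_zero]
    rw [← pvFilterMap_ite]
    apply List.filterMap_congr
    intro m _
    by_cases h3 : pvStartswithAt match_.toList ['\'', '#', ' '] m
    · simp [h3, pvS3_imp_S2 match_.toList m h3]
    · by_cases hs2 : pvStartswithAt match_.toList ['\'', '#'] m <;> simp [h3, hs2]
  · rw [pvFilterMap_ite, pvOccsFrom]
    simp only [Nat.sub_zero]
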